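-- pv_equiv track=rewrite | github.com/PierreVieira/AEDS2 | 2020.1.2/p1-arvore-2/tree.py | sorted_array_to_balanced_tree
-- ===== SOURCE A (Python) =====
-- def sorted_array_to_balanced_tree(array):
--     array1, array2 = array[0:len(array) // 2], array[len(array) // 2:len(array)]
--     array3 = [array2.pop(0)]
--     while len(array1) > 0 or len(array2) > 0:
--         try:
--             retirado1 = array1.pop(len(array1) // 2)
--         except IndexError:
--             pass
--         else:
--             array3.append(retirado1)
--         try:
--             retirado2 = array2.pop(len(array2) // 2)
--         except IndexError:
--             pass
--         else:
--             array3.append(retirado2)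
--     return array3
-- ===== SOURCE B (Python) =====
-- def _middle_pop_order(m):
--     # Closed-form index order of repeatedly popping index len//2 from a list of length m.
--     if m == 0:
--         return []
--     c = m // 2
--     out = [c]
--     if m % 2 == 1:
--         for k in range(c):
--             out.append(c + k + 1)
--             out.append(c - k - 1)
--     else:
--         for k in range(c - 1):
--             out.append(c - k - 1)
--             out.append(c + k + 1)
--         out.append(0)
--     return out
--
--
-- def sorted_array_to_balanced_tree(array):
--     n = len(array)
--     half1 = array[:n // 2]
--     half2 = array[n // 2:]
--     head, rest = half2[0], half2[1:]
--     s1 = [half1[i] for i in _middle_pop_order(len(half1))]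
--     s2 = [rest[i] for i in _middle_pop_order(len(rest))]
--     out = [head]
--     for x, y in zip(s1, s2):
--         out.append(x)
--         out.append(y)
--     if len(s1) > len(s2):
--         out.append(s1[-1])
--     return out
-- ===== Notes on version B (the rewrite author's own statement) =====
-- stated objective: faster
-- what changed: Replaces the quadratic simulation of repeated middle-pops on shrinking lists by a closed-form zig-zag index order around each half's center, computed once and used to index the halves directly, with the two streams merged by a single zip.
import Mathlib
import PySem

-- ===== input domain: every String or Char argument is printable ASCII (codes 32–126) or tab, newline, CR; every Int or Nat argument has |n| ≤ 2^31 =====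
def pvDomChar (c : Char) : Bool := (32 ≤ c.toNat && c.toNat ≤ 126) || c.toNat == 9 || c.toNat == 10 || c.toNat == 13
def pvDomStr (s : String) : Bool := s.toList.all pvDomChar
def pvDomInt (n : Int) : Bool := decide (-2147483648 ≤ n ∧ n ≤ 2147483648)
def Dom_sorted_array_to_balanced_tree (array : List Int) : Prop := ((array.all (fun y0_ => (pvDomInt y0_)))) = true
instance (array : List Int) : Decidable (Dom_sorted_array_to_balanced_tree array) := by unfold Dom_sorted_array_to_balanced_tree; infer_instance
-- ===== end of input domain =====

-- B replaces A's quadratic simulation of repeated middle-pops by a closed-form zig-zag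
-- index order around each half's center, used to index the halves directly (O(n)).
-- Pre_ excludes only the empty list, on which A raises IndexError (array2.pop(0)).


-- ===== PORT A =====
-- the while loop of A: per iteration pop array1's middle (skip on IndexError = empty),
-- then array2's middle, appending each popped element to array3
def pvLoopA (a1 a2 a3 : List Int) : List Int :=
  if a1.length > 0 ∨ a2.length > 0 then
    match h1 : PySem.List.pop? a1 (PySem.Int.floordiv (a1.length : Int) 2) with
    | some (r1, a1') =>
      match h2 : PySem.List.pop? a2 (PySem.Int.floordiv (a2.length : Int) 2) with
      | some (r2, a2') => pvLoopA a1' a2' (a3 ++ [r1, r2])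
      | none => pvLoopA a1' a2 (a3 ++ [r1])
    | none =>
      match h2 : PySem.List.pop? a2 (PySem.Int.floordiv (a2.length : Int) 2) with
      | some (r2, a2') => pvLoopA a1 a2' (a3 ++ [r2])
      | none => a3
  else a3
termination_by a1.length + a2.length
decreasing_by
  · have e1 : a1'.length + 1 = a1.length := PySem.List.length_of_pop?_eq_some _ h1
    have e2 : a2'.length + 1 = a2.length := PySem.List.length_of_pop?_eq_some _ h2
    omega
  · have e1 : a1'.length + 1 = a1.length := PySem.List.length_of_pop?_eq_some _ h1
    omega
  · have e2 : a2'.length + 1 = a2.length := PySem.List.length_of_pop?_eq_some _ h2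
    omega

def sorted_array_to_balanced_tree (array : List Int) : List Int :=
  let array1 := PySem.List.slice array (some 0) (some (PySem.Int.floordiv (array.length : Int) 2))
  let array2 := PySem.List.slice array (some (PySem.Int.floordiv (array.length : Int) 2)) (some (array.length : Int))
  match PySem.List.pop? array2 0 with
  | none => []  -- IndexError on the empty list; excluded by Pre_
  | some (h, rest) => pvLoopA array1 rest [h]

-- ===== PORT B =====
-- closed-form order of indices produced by repeatedly popping index len//2 of a length-m list
def pvMidOrder (m : Nat) : List Nat :=
  if m = 0 then []
  else
    let c := m / 2
    if m % 2 = 1 then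
      (List.range c).foldl (fun out k => out ++ [c + k + 1, c - k - 1]) [c]
    else
      ((List.range (c - 1)).foldl (fun out k => out ++ [c - k - 1, c + k + 1]) [c]) ++ [0]

def sorted_array_to_balanced_tree_alt (array : List Int) : List Int :=
  let n := array.length
  let half1 := array.take (n / 2)
  let half2 := array.drop (n / 2)
  match half2 with
  | [] => []  -- half2[0] raises IndexError; excluded by Pre_
  | head :: rest =>
    let s1 := (pvMidOrder half1.length).map (fun i => half1.getD i 0)
    let s2 := (pvMidOrder rest.length).map (fun i => rest.getD i 0)
    let out := (s1.zip s2).foldl (fun out p => out ++ [p.1, p.2]) [head]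
    if s1.length > s2.length then out ++ [s1.getLastD 0] else out

-- ===== PRECONDITION & SPEC =====
-- Pre_ excludes exactly the empty list: there A raises IndexError (array2.pop(0)), and B
-- raises IndexError too (half2[0]).
def Pre_sorted_array_to_balanced_tree (array : List Int) : Prop := array ≠ []
instance (array : List Int) : Decidable (Pre_sorted_array_to_balanced_tree array) := by
  unfold Pre_sorted_array_to_balanced_tree; infer_instance

def pvWitness_sorted_array_to_balanced_tree : List Int := [1, 2, 3, 4, 5]

def Spec_sorted_array_to_balanced_tree (array : List Int) (out : List Int) : Prop := out = sorted_array_to_balanced_tree_alt array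
instance (array : List Int) (out : List Int) : Decidable (Spec_sorted_array_to_balanced_tree array out) := by unfold Spec_sorted_array_to_balanced_tree; infer_instance

-- ===== CLAIM (what is proved, stated in full; the proofs are below) =====
def Claim_equal_sorted_array_to_balanced_tree : Prop := ∀ (array : List Int), Dom_sorted_array_to_balanced_tree array → Pre_sorted_array_to_balanced_tree array → Spec_sorted_array_to_balanced_tree array (sorted_array_to_balanced_tree array)

-- ===== LEMMAS AND PROOFS =====

-- the middle-pop sequence of a list (semantic reference for both programs)
def pvMidSeq {α : Type} (l : List α) : List α :=
  if h : l.length = 0 then []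
  else
    l[l.length / 2]'(Nat.div_lt_self (Nat.pos_of_ne_zero h) one_lt_two) ::
      pvMidSeq (l.take (l.length / 2) ++ l.drop (l.length / 2 + 1))
termination_by l.length
decreasing_by
  simp only [List.length_append, List.length_take, List.length_drop]
  omega

-- interleaving: one element of each list per round, first list first
def pvInterleave {α : Type} : List α → List α → List α
  | [], ys => ys
  | x :: xs, [] => x :: xs
  | x :: xs, y :: ys => x :: y :: pvInterleave xs ys

@[simp] theorem pvMidSeq_nil0 {α : Type} : pvMidSeq ([] : List α) = [] := by
  rw [pvMidSeq]; simp

theorem pvMidSeq_ne_nil {α : Type} (l : List α) (h : l.length ≠ 0) :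
    pvMidSeq l = l[l.length / 2]'(Nat.div_lt_self (Nat.pos_of_ne_zero h) one_lt_two) ::
      pvMidSeq (l.take (l.length / 2) ++ l.drop (l.length / 2 + 1)) := by
  rw [pvMidSeq]
  simp [h]

theorem pvMidSeq_length {α : Type} (l : List α) : (pvMidSeq l).length = l.length := by
  fun_induction pvMidSeq with
  | case1 l h => simp [h]
  | case2 l h ih =>
    simp only [List.length_cons, ih, List.length_append, List.length_take, List.length_drop]
    omega

theorem pvMidSeq_map {α β : Type} (f : α → β) (l : List α) :
    pvMidSeq (l.map f) = (pvMidSeq l).map f := by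
  fun_induction pvMidSeq (l := l) with
  | case1 l h =>
    have : l = [] := List.length_eq_zero_iff.mp h
    simp [this, pvMidSeq]
  | case2 l h ih =>
    rw [pvMidSeq]
    simp only [List.length_map, h, dite_false, ← List.map_take, ← List.map_drop, ← List.map_append, ih,
      List.getElem_map, List.map_cons]

@[simp] theorem pvInterleave_nil_right {α : Type} (xs : List α) : pvInterleave xs [] = xs := by
  cases xs <;> rfl

-- pop? at len//2 of a nonempty list pops the middle-pop head
theorem pop?_mid {α : Type} (l : List α) (r : α × List α)
    (h : PySem.List.pop? l (PySem.Int.floordiv (l.length : Int) 2) = some r) :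
    l.length ≠ 0 ∧ pvMidSeq l = r.1 :: pvMidSeq r.2 := by
  have hne : l.length ≠ 0 := by
    intro h0
    have : l = [] := List.length_eq_zero_iff.mp h0
    subst this
    simp [PySem.List.pop?] at h
  refine ⟨hne, ?_⟩
  have hc : l.length / 2 < l.length := Nat.div_lt_self (Nat.pos_of_ne_zero hne) one_lt_two
  have : PySem.Int.floordiv (l.length : Int) 2 = ((l.length / 2 : Nat) : Int) := by
    exact_mod_cast PySem.Int.floordiv_natCast l.length 2
  rw [this, PySem.List.pop?_natCast _ _ hc] at h
  have hr : r = (l[l.length / 2], l.eraseIdx (l.length / 2)) := by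
    exact (Option.some_injective _ h).symm
  subst hr
  rw [pvMidSeq]
  simp only [hne, dite_false]
  congr 1
  rw [List.eraseIdx_eq_take_drop_succ]

theorem pop?_mid_none {α : Type} (l : List α)
    (h : PySem.List.pop? l (PySem.Int.floordiv (l.length : Int) 2) = none) : l = [] := by
  rcases l with _ | ⟨x, xs⟩
  · rfl
  · exfalso
    have hc : (x :: xs).length / 2 < (x :: xs).length :=
      Nat.div_lt_self (by simp) one_lt_two
    have e : PySem.Int.floordiv ((x :: xs).length : Int) 2 = (((x :: xs).length / 2 : Nat) : Int) := by
      exact_mod_cast PySem.Int.floordiv_natCast (x :: xs).length 2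
    rw [e, PySem.List.pop?_natCast _ _ hc] at h
    simp at h

theorem pvLoopA_eq (a1 a2 a3 : List Int) :
    pvLoopA a1 a2 a3 = a3 ++ pvInterleave (pvMidSeq a1) (pvMidSeq a2) := by
  fun_induction pvLoopA with
  | case1 a1 a2 a3 hcond r1 a1' h1 r2 a2' h2 ih =>
    obtain ⟨hne1, hm1⟩ := pop?_mid a1 (r1, a1') h1
    obtain ⟨hne2, hm2⟩ := pop?_mid a2 (r2, a2') h2
    rw [ih, hm1, hm2]
    simp [pvInterleave]
  | case2 a1 a2 a3 hcond r1 a1' h1 h2 ih =>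
    obtain ⟨hne1, hm1⟩ := pop?_mid a1 (r1, a1') h1
    have : a2 = [] := pop?_mid_none a2 h2
    subst this
    rw [ih, hm1]
    simp [pvInterleave]
  | case3 a1 a2 a3 hcond h1 r2 a2' h2 ih =>
    obtain ⟨hne2, hm2⟩ := pop?_mid a2 (r2, a2') h2
    have : a1 = [] := pop?_mid_none a1 h1
    subst this
    rw [ih, hm2]
    simp [pvInterleave]
  | case4 a1 a2 a3 hcond h1 h2 =>
    have e1 : a1 = [] := pop?_mid_none a1 h1
    have e2 : a2 = [] := pop?_mid_none a2 h2
    subst e1; subst e2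
    simp [pvInterleave]
  | case5 a1 a2 a3 hcond =>
    have e1 : a1 = [] := by
      rcases a1 with _ | _
      · rfl
      · exfalso; exact hcond (Or.inl (by simp))
    have e2 : a2 = [] := by
      rcases a2 with _ | _
      · rfl
      · exfalso; exact hcond (Or.inr (by simp))
    subst e1; subst e2
    simp [pvInterleave]

theorem flatPairs_length {β : Type} (f g : Nat → β) (n : Nat) :
    ((List.range n).flatMap fun k => [f k, g k]).length = 2 * n := by
  induction n generalizing f g with
  | zero => simp
  | succ n ih =>
    rw [List.range_succ_eq_map]
    simp only [List.flatMap_cons, List.flatMap_map]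
    simp only [List.length_append, List.length_cons, List.length_nil, Nat.succ_eq_add_one]
    rw [ih (fun k => f (k+1)) (fun k => g (k+1))]
    omega

theorem flatPairs_getElem? {β : Type} (f g : Nat → β) (n j : Nat) (hj : j < 2 * n) :
    ((List.range n).flatMap fun k => [f k, g k])[j]? =
      some (if j % 2 = 0 then f (j / 2) else g (j / 2)) := by
  induction n generalizing f g j with
  | zero => omega
  | succ n ih =>
    rw [List.range_succ_eq_map]
    simp only [List.flatMap_cons, List.flatMap_map]
    simp only [Nat.succ_eq_add_one]
    match j, hj with
    | 0, _ => simp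
    | 1, _ => simp
    | (j+2), hj =>
      have hj' : j < 2 * n := by omega
      rw [List.getElem?_append_right (by simp)]
      simp only [List.length_cons, List.length_nil]
      have e1 : j + 2 - (0 + 1 + 1) = j := by omega
      rw [e1, ih (fun k => f (k+1)) (fun k => g (k+1)) j hj']
      have e2 : (j + 2) % 2 = j % 2 := by omega
      rw [e2]
      by_cases hp : j % 2 = 0 <;> simp [hp] <;> congr 1 <;> omega

theorem pvMidOrder_odd (m : Nat) (h1 : m % 2 = 1) :
    pvMidOrder m = m / 2 :: (List.range (m / 2)).flatMap (fun k => [m / 2 + k + 1, m / 2 - k - 1]) := by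
  unfold pvMidOrder
  have h0 : m ≠ 0 := by omega
  simp only [h0, if_false, h1, if_true]
  rw [PySem.List.foldl_append_eq_flatMap]
  simp [List.flatMap]

theorem pvMidOrder_even (m : Nat) (h0 : m ≠ 0) (h1 : m % 2 = 0) :
    pvMidOrder m = (m / 2 :: (List.range (m / 2 - 1)).flatMap (fun k => [m / 2 - k - 1, m / 2 + k + 1])) ++ [0] := by
  unfold pvMidOrder
  simp only [h0, if_false, h1]
  rw [PySem.List.foldl_append_eq_flatMap]
  simp [List.flatMap]

theorem pvMidOrder_step (m : Nat) (hm : 1 ≤ m) :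
    pvMidOrder m = m / 2 :: (pvMidOrder (m - 1)).map (fun i => if i < m / 2 then i else i + 1) := by
  by_cases hodd : m % 2 = 1
  · -- m = 2c+1
    by_cases hc : m / 2 = 0
    · have : m = 1 := by omega
      subst this
      decide
    · have hme : (m - 1) % 2 = 0 ∧ (m - 1) / 2 = m / 2 ∧ (m - 1) ≠ 0 := by omega
      rw [pvMidOrder_odd m hodd, pvMidOrder_even (m - 1) hme.2.2 hme.1, hme.2.1]
      congr 1
      apply List.ext_getElem?
      intro i
      by_cases hi : i < 2 * (m / 2)
      · rw [flatPairs_getElem? (fun k => m / 2 + k + 1) (fun k => m / 2 - k - 1) (m / 2) i hi]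
        rw [List.cons_append, List.getElem?_map]
        rcases i with _ | j
        · rw [List.getElem?_cons_zero]
          simp only [Option.map_some, Option.some_inj]
          split_ifs <;> omega
        · rw [List.getElem?_cons_succ]
          by_cases hj : j < 2 * (m / 2 - 1)
          · rw [List.getElem?_append_left (by rw [flatPairs_length]; exact hj)]
            rw [flatPairs_getElem? (fun k => m / 2 - k - 1) (fun k => m / 2 + k + 1) (m / 2 - 1) j hj]
            simp only [Option.map_some, Option.some_inj]
            split_ifs <;> omega
          · have hj2 : j - ((List.range (m / 2 - 1)).flatMap (fun k => [m / 2 - k - 1, m / 2 + k + 1])).length = 0 := by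
              rw [flatPairs_length]; omega
            rw [List.getElem?_append_right (by rw [flatPairs_length]; omega), hj2]
            simp only [List.getElem?_cons_zero, Option.map_some, Option.some_inj]
            split_ifs <;> omega
      · rw [List.getElem?_eq_none (by rw [flatPairs_length]; omega)]
        rw [List.getElem?_eq_none]
        simp only [List.length_map, List.cons_append, List.length_cons, List.length_append,
          List.length_singleton, List.length_nil]
        rw [flatPairs_length]
        omega
  · -- m = 2c
    by_cases hc : m / 2 = 1
    · have : m = 2 := by omega
      subst this
      decide
    · have hme : (m - 1) % 2 = 1 ∧ (m - 1) / 2 = m / 2 - 1 := by omega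
      rw [pvMidOrder_even m (by omega) (by omega), pvMidOrder_odd (m - 1) hme.1, hme.2]
      rw [List.cons_append]
      congr 1
      apply List.ext_getElem?
      intro i
      rw [List.getElem?_map]
      by_cases hi : i < 2 * (m / 2 - 1)
      · rw [List.getElem?_append_left (by rw [flatPairs_length]; exact hi)]
        rw [flatPairs_getElem? (fun k => m / 2 - k - 1) (fun k => m / 2 + k + 1) (m / 2 - 1) i hi]
        rcases i with _ | j
        · rw [List.getElem?_cons_zero]
          simp only [Option.map_some, Option.some_inj]
          split_ifs <;> omega
        · rw [List.getElem?_cons_succ]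
          rw [flatPairs_getElem? (fun k => m / 2 - 1 + k + 1) (fun k => m / 2 - 1 - k - 1) (m / 2 - 1) j (by omega)]
          simp only [Option.map_some, Option.some_inj]
          split_ifs <;> omega
      · by_cases hi2 : i = 2 * (m / 2 - 1)
        · obtain ⟨j, rfl⟩ : ∃ j, i = j + 1 := ⟨i - 1, by omega⟩
          rw [List.getElem?_append_right (by rw [flatPairs_length]; omega)]
          have e0 : j + 1 - ((List.range (m / 2 - 1)).flatMap (fun k => [m / 2 - k - 1, m / 2 + k + 1])).length = 0 := by
            rw [flatPairs_length]; omega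
          rw [e0, List.getElem?_cons_zero, List.getElem?_cons_succ]
          rw [flatPairs_getElem? (fun k => m / 2 - 1 + k + 1) (fun k => m / 2 - 1 - k - 1) (m / 2 - 1) j (by omega)]
          simp only [Option.map_some, Option.some_inj]
          split_ifs <;> omega
        · rw [List.getElem?_eq_none (by simp only [List.length_append, List.length_singleton]; rw [flatPairs_length]; omega)]
          rw [List.getElem?_eq_none]
          · simp
          · simp only [List.length_cons]
            rw [flatPairs_length]
            omega


-- removing the middle index from range m relabels range (m-1)
theorem range_eraseMid (m c : Nat) (hc : c < m) :
    (List.range m).take c ++ (List.range m).drop (c + 1) =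
      (List.range (m - 1)).map (fun i => if i < c then i else i + 1) := by
  apply List.ext_getElem?
  intro i
  by_cases him : i < m - 1
  · have h1 : (List.range (m - 1))[i]? = some i := by
      rw [List.getElem?_eq_getElem (by simpa using him)]
      simp
    rw [List.getElem?_map, h1]
    by_cases hic : i < c
    · rw [List.getElem?_append_left (by simp [List.length_take]; omega)]
      rw [List.getElem?_take_of_lt hic]
      rw [List.getElem?_eq_getElem (by simpa using (by omega : i < m))]
      simp [hic]
    · rw [List.getElem?_append_right (by simp [List.length_take]; omega)]
      rw [List.getElem?_drop]
      have e : c + 1 + (i - ((List.range m).take c).length) = i + 1 := by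
        simp [List.length_take]
        omega
      rw [e, List.getElem?_eq_getElem (by simpa using (by omega : i + 1 < m))]
      simp [hic]
  · rw [List.getElem?_eq_none (by simp [List.length_take]; omega)]
    rw [List.getElem?_map, List.getElem?_eq_none (by simp; omega)]
    simp

-- the closed-form order is the middle-pop sequence of the index list
theorem pvMidOrder_eq_midSeq_range (m : Nat) : pvMidOrder m = pvMidSeq (List.range m) := by
  induction m using Nat.strong_induction_on with
  | _ m ih =>
    rcases Nat.eq_zero_or_pos m with h0 | hpos
    · subst h0
      simp [pvMidOrder]
    · have hne : (List.range m).length ≠ 0 := by simp; omega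
      rw [pvMidSeq_ne_nil _ hne]
      simp only [List.length_range]
      rw [range_eraseMid m (m / 2) (Nat.div_lt_self hpos one_lt_two)]
      rw [pvMidSeq_map]
      rw [← ih (m - 1) (by omega)]
      rw [List.getElem_range]
      exact pvMidOrder_step m hpos

-- indexing a list by the closed-form order yields its middle-pop sequence
theorem map_getD_pvMidOrder (l : List Int) :
    (pvMidOrder l.length).map (fun i => l.getD i 0) = pvMidSeq l := by
  have hrange : (List.range l.length).map (fun i => l.getD i 0) = l := by
    apply List.ext_getElem?
    intro i
    by_cases hi : i < l.length
    · simp [List.getElem?_map, hi, List.getD, List.getElem?_eq_getElem hi]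
    · simp [List.getElem?_map, hi]
  conv_rhs => rw [← hrange]
  rw [pvMidSeq_map, pvMidOrder_eq_midSeq_range]

theorem pvGetLastD_cons_of_ne_nil (x : Int) (xs : List Int) (h : xs ≠ []) :
    (x :: xs).getLastD 0 = xs.getLastD 0 := by
  rcases xs with _ | ⟨z, zs⟩
  · contradiction
  · rfl

-- zip-flatten plus the possible leftover equals the interleaving (when |s2| ≤ |s1| ≤ |s2|+1)
theorem pvZip_flatten_eq_interleave (s1 s2 : List Int) (h1 : s2.length ≤ s1.length)
    (h2 : s1.length ≤ s2.length + 1) :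
    ((s1.zip s2).flatMap (fun p => [p.1, p.2])) ++
        (if s1.length > s2.length then [s1.getLastD 0] else []) =
      pvInterleave s1 s2 := by
  induction s1 generalizing s2 with
  | nil =>
    have : s2 = [] := by
      rcases s2 with _ | _
      · rfl
      · simp at h1
    subst this
    simp [pvInterleave]
  | cons x xs ih =>
    rcases s2 with _ | ⟨y, ys⟩
    · have : xs = [] := by
        rcases xs with _ | _
        · rfl
        · simp at h2
      subst this
      simp [pvInterleave]
    · simp only [List.zip_cons_cons, List.flatMap_cons, pvInterleave]
      rw [List.append_assoc]
      simp only [List.length_cons] at h1 h2 ⊢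
      have e := ih ys (by omega) (by omega)
      by_cases hxy : xs.length > ys.length
      · have hxs : xs ≠ [] := by
          intro h
          subst h
          simp at hxy
        rw [if_pos (by omega : xs.length + 1 > ys.length + 1), if_pos hxy] at *
        rw [pvGetLastD_cons_of_ne_nil x xs hxs]
        rw [e]
        simp
      · rw [if_neg (by omega : ¬ xs.length + 1 > ys.length + 1)]
        rw [if_neg hxy] at e
        rw [e]
        simp

-- ===== VERDICT (by name: the statement is the Claim_ definition above) =====
theorem sorted_array_to_balanced_tree_spec : Claim_equal_sorted_array_to_balanced_tree := by
  intro array _ hpre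
  unfold Pre_sorted_array_to_balanced_tree at hpre
  unfold Spec_sorted_array_to_balanced_tree
  have hn : array.length ≠ 0 := by
    simpa using hpre
  have hf : PySem.Int.floordiv (array.length : Int) 2 = ((array.length / 2 : Nat) : Int) := by
    exact_mod_cast PySem.Int.floordiv_natCast array.length 2
  unfold sorted_array_to_balanced_tree sorted_array_to_balanced_tree_alt
  simp only [hf, PySem.List.slice_zero_start, PySem.List.slice_to_natCast,
    PySem.List.slice_natCast]
  rw [List.take_of_length_le (by simp)]
  rcases hd : array.drop (array.length / 2) with _ | ⟨h, t⟩
  · exfalso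
    have := congrArg List.length hd
    simp at this
    omega
  · have ht : t.length + 1 = array.length - array.length / 2 := by
      have := congrArg List.length hd
      simp at this
      omega
    rw [PySem.List.pop?_zero_cons]
    dsimp only
    rw [pvLoopA_eq]
    rw [map_getD_pvMidOrder, map_getD_pvMidOrder]
    rw [PySem.List.foldl_append_eq_flatMap]
    have hlen1 : (pvMidSeq (array.take (array.length / 2))).length = array.length / 2 := by
      rw [pvMidSeq_length]
      simp
      omega
    have hlen2 : (pvMidSeq t).length = t.length := pvMidSeq_length t
    rw [← pvZip_flatten_eq_interleave (pvMidSeq (array.take (array.length / 2))) (pvMidSeq t)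
      (by rw [hlen1, hlen2]; omega) (by rw [hlen1, hlen2]; omega)]
    by_cases hcond : (pvMidSeq (array.take (array.length / 2))).length > (pvMidSeq t).length
    · rw [if_pos hcond, if_pos hcond]
      simp
    · rw [if_neg hcond, if_neg hcond]
      simp
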